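-- pv_equiv track=rewrite | github.com/PrathameshJadhav30/Accenture-PYQ-Coding-Questions | 041- Maximum Favourite Songs in Playlist/MaxFavouriteSong.py | max_favourite_songs
-- ===== SOURCE A (Python) =====
-- def max_favourite_songs(S: str, K: int) -> int:
--     count = S[:K].count('a')
--     max_count = count
--
--     for i in range(K, len(S)):
--         if S[i - K] == 'a':
--             count -= 1
--         if S[i] == 'a':
--             count += 1
--         max_count = max(max_count, count)
--
--     return max_count
-- ===== SOURCE B (Python) =====
-- def max_favourite_songs(S: str, K: int) -> int:
--     n = len(S)
--     P = [0]
--     for c in S: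
--         P.append(P[-1] + (1 if c == 'a' else 0))
--     ans = P[min(K, n)]
--     for i in range(1, n - K + 1):
--         ans = max(ans, P[i + K] - P[i])
--     return ans
-- ===== Notes on version B (the rewrite author's own statement) =====
-- stated objective: alternative
-- what changed: Replaces A's sliding-window counter (incrementally adding/removing the window's edge characters) by a prefix-count array: B builds cumulative counts P once and takes the max of P[i+K]-P[i] over all window starts.
import Mathlib
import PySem

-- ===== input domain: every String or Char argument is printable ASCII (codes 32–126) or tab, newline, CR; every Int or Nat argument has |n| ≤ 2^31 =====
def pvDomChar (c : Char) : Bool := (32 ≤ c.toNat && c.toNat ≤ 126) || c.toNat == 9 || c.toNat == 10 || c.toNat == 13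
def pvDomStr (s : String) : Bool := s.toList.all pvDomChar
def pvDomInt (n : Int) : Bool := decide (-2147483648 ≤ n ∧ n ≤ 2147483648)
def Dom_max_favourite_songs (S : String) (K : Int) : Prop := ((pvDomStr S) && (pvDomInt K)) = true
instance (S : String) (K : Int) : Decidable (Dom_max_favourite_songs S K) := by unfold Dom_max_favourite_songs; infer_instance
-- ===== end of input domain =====

-- B replaces A's sliding-window counter by a prefix-count array (max of P[i+K]-P[i] over starts): a different decomposition, same cost.

-- ===== PORT A =====
def max_favourite_songs (S : String) (K : Int) : Int :=
  let cs := S.toList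
  let count0 : Int := ((PySem.List.slice cs none (some K)).count 'a' : Int)
  let r := (PySem.List.pyRange K (PySem.List.len cs) 1).foldl
    (fun st i =>
      let c1 := if PySem.List.pyGetD cs (i - K) ' ' = 'a' then st.1 - 1 else st.1
      let c2 := if PySem.List.pyGetD cs i ' ' = 'a' then c1 + 1 else c1
      (c2, max st.2 c2)) (count0, count0)
  r.2

-- ===== PORT B =====
def max_favourite_songs_alt (S : String) (K : Int) : Int :=
  let n : Int := PySem.List.len S.toList
  let P : List Int := S.toList.foldl
    (fun P c => P ++ [PySem.List.pyGetD P (-1) 0 + (if c = 'a' then 1 else 0)]) [0]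
  let ans : Int := PySem.List.pyGetD P (min K n) 0
  (PySem.List.pyRange 1 (n - K + 1) 1).foldl
    (fun ans i => max ans (PySem.List.pyGetD P (i + K) 0 - PySem.List.pyGetD P i 0)) ans

-- ===== PRECONDITION & SPEC =====
-- For every K < 0 (any S) A raises IndexError via the out-of-range access S[i-K]; Pre_ excludes exactly those inputs.
def Pre_max_favourite_songs (_S : String) (K : Int) : Prop := 0 ≤ K
instance (S : String) (K : Int) : Decidable (Pre_max_favourite_songs S K) := by unfold Pre_max_favourite_songs; infer_instance
def pvWitness_max_favourite_songs : String × Int := ("abca songs", 3)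

def Spec_max_favourite_songs (S : String) (K : Int) (out : Int) : Prop := out = max_favourite_songs_alt S K
instance (S : String) (K : Int) (out : Int) : Decidable (Spec_max_favourite_songs S K out) := by unfold Spec_max_favourite_songs; infer_instance

-- ===== CLAIM (what is proved, stated in full; the proofs are below) =====
def Claim_equal_max_favourite_songs : Prop := ∀ (S : String) (K : Int), Dom_max_favourite_songs S K → Pre_max_favourite_songs S K → Spec_max_favourite_songs S K (max_favourite_songs S K)

-- ===== LEMMAS AND PROOFS =====

-- prefix count of 'a' among the first j characters
def prefA (cs : List Char) (j : Nat) : Int := ((cs.take j).count 'a' : Int)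

theorem prefA_of_le (cs : List Char) {j : Nat} (h : cs.length ≤ j) :
    prefA cs j = prefA cs cs.length := by
  unfold prefA
  rw [List.take_of_length_le h, List.take_of_length_le le_rfl]

theorem prefA_succ (cs : List Char) {j : Nat} (h : j < cs.length) :
    prefA cs (j + 1) = prefA cs j + (if cs[j] = 'a' then 1 else 0) := by
  unfold prefA
  rw [List.take_add_one, List.getElem?_eq_getElem h]
  rw [List.count_append]
  split_ifs with hc <;> simp [hc]

-- B's prefix array is the table of prefA values
theorem buildP_eq (cs : List Char) :
    cs.foldl (fun P c => P ++ [PySem.List.pyGetD P (-1) 0 + (if c = 'a' then 1 else 0)]) [0]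
      = (List.range (cs.length + 1)).map (prefA cs) := by
  induction cs using List.reverseRecOn with
  | nil => simp [prefA]
  | append_singleton cs c ih =>
    rw [List.foldl_append, ih]
    simp only [List.foldl_cons, List.foldl_nil]
    have hlast : (List.range (cs.length + 1)).map (prefA cs)
        = (List.range cs.length).map (prefA cs) ++ [prefA cs cs.length] := by
      rw [List.range_succ, List.map_append]; rfl
    rw [hlast, List.append_assoc, PySem.List.pyGetD_neg_one_append_singleton]
    have hlen : (cs ++ [c]).length + 1 = (cs.length + 1) + 1 := by simp
    rw [hlen, List.range_succ, List.map_append]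
    have h1 : (List.range (cs.length + 1)).map (prefA (cs ++ [c]))
        = (List.range (cs.length + 1)).map (prefA cs) := by
      apply List.map_congr_left
      intro j hj
      rw [List.mem_range] at hj
      unfold prefA
      rw [List.take_append_of_le_length (by omega)]
    rw [h1, hlast, List.append_assoc]
    congr 1
    congr 1
    have h2 : prefA (cs ++ [c]) (cs.length + 1) = prefA cs cs.length + (if c = 'a' then 1 else 0) := by
      unfold prefA
      rw [List.take_of_length_le (by simp), List.take_of_length_le le_rfl, List.count_append]
      split_ifs with hc <;> simp [hc]
    simp [h2]

-- A's loop invariant: starting at index a with the true window count, the fold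
-- returns the running max over the remaining window counts.
theorem A_fold (cs : List Char) (K : Int) (hK : 0 ≤ K) :
    ∀ (d : Nat) (a : Int), K ≤ a → a + d = (cs.length : Int) → ∀ (m : Int),
      ((PySem.List.pyRange a (cs.length : Int) 1).foldl
        (fun st i =>
          (if PySem.List.pyGetD cs i ' ' = 'a' then
              (if PySem.List.pyGetD cs (i - K) ' ' = 'a' then st.1 - 1 else st.1) + 1
            else if PySem.List.pyGetD cs (i - K) ' ' = 'a' then st.1 - 1 else st.1,
            max st.2
              (if PySem.List.pyGetD cs i ' ' = 'a' then
                (if PySem.List.pyGetD cs (i - K) ' ' = 'a' then st.1 - 1 else st.1) + 1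
              else if PySem.List.pyGetD cs (i - K) ' ' = 'a' then st.1 - 1 else st.1)))
        (prefA cs a.toNat - prefA cs (a - K).toNat, m)).2
      = ((PySem.List.pyRange a (cs.length : Int) 1).map
          (fun i => prefA cs (i + 1).toNat - prefA cs (i + 1 - K).toNat)).foldl max m := by
  intro d
  induction d with
  | zero =>
    intro a ha hlen m
    rw [PySem.List.pyRange_one_eq_nil (by omega)]
    simp
  | succ d ih =>
    intro a ha hlen m
    have halt : a < (cs.length : Int) := by omega
    rw [PySem.List.pyRange_one_cons halt]
    simp only [List.foldl_cons, List.map_cons]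
    have hga : PySem.List.pyGetD cs a ' ' = cs[a.toNat] :=
      PySem.List.pyGetD_eq_getElem cs ' ' (by omega) (by omega)
    have hgk : PySem.List.pyGetD cs (a - K) ' ' = cs[(a - K).toNat] :=
      PySem.List.pyGetD_eq_getElem cs ' ' (by omega) (by omega)
    have hsa : (a + 1).toNat = a.toNat + 1 := by omega
    have hsk : (a + 1 - K).toNat = (a - K).toNat + 1 := by omega
    have hpa : prefA cs (a + 1).toNat = prefA cs a.toNat + (if cs[a.toNat] = 'a' then 1 else 0) := by
      rw [hsa]; exact prefA_succ cs (by omega)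
    have hpk : prefA cs (a + 1 - K).toNat
        = prefA cs (a - K).toNat + (if cs[(a - K).toNat] = 'a' then 1 else 0) := by
      rw [hsk]; exact prefA_succ cs (by omega)
    have hc2 : ((if PySem.List.pyGetD cs a ' ' = 'a' then
            (if PySem.List.pyGetD cs (a - K) ' ' = 'a' then prefA cs a.toNat - prefA cs (a - K).toNat - 1
              else prefA cs a.toNat - prefA cs (a - K).toNat) + 1
          else
            if PySem.List.pyGetD cs (a - K) ' ' = 'a' then prefA cs a.toNat - prefA cs (a - K).toNat - 1
            else prefA cs a.toNat - prefA cs (a - K).toNat,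
          max m
            (if PySem.List.pyGetD cs a ' ' = 'a' then
              (if PySem.List.pyGetD cs (a - K) ' ' = 'a' then prefA cs a.toNat - prefA cs (a - K).toNat - 1
                else prefA cs a.toNat - prefA cs (a - K).toNat) + 1
            else
              if PySem.List.pyGetD cs (a - K) ' ' = 'a' then prefA cs a.toNat - prefA cs (a - K).toNat - 1
              else prefA cs a.toNat - prefA cs (a - K).toNat)) : Int × Int)
        = (prefA cs (a + 1).toNat - prefA cs (a + 1 - K).toNat,
           max m (prefA cs (a + 1).toNat - prefA cs (a + 1 - K).toNat)) := by
      rw [hga, hgk, hpa, hpk]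
      split_ifs <;> simp only [Prod.mk.injEq] <;> omega
    rw [hc2]
    exact ih (a + 1) (by omega) (by omega) _

theorem main_eq (S : String) (K : Int) (hK : 0 ≤ K) :
    max_favourite_songs S K = max_favourite_songs_alt S K := by
  unfold max_favourite_songs max_favourite_songs_alt
  simp only [PySem.List.len_eq, buildP_eq]
  rw [PySem.List.slice_to S.toList hK]
  set cs := S.toList with hcs
  set n := cs.length with hn
  have hP : ∀ j : Int, 0 ≤ j → j ≤ (n : Int) →
      PySem.List.pyGetD ((List.range (n + 1)).map (prefA cs)) j 0 = prefA cs j.toNat := by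
    intro j h0 h1
    rw [PySem.List.pyGetD_eq_getElem _ _ h0 (by simp; omega)]
    rw [List.getElem_map, List.getElem_range]
  have hseed : PySem.List.pyGetD ((List.range (n + 1)).map (prefA cs)) (min K ↑n) 0
      = prefA cs (min K ↑n).toNat := hP _ (by omega) (by omega)
  rw [hseed]
  have hBcong : (PySem.List.pyRange 1 (↑n - K + 1) 1).foldl
      (fun ans i => max ans (PySem.List.pyGetD ((List.range (n + 1)).map (prefA cs)) (i + K) 0
        - PySem.List.pyGetD ((List.range (n + 1)).map (prefA cs)) i 0))
      (prefA cs (min K ↑n).toNat)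
      = (PySem.List.pyRange 1 (↑n - K + 1) 1).foldl
      (fun ans i => max ans (prefA cs (i + K).toNat - prefA cs i.toNat))
      (prefA cs (min K ↑n).toNat) := by
    apply PySem.List.foldl_congr_mem
    intro acc x hx
    rw [PySem.List.mem_pyRange_one] at hx
    rw [hP (x + K) (by omega) (by omega), hP x (by omega) (by omega)]
  rw [hBcong, ← List.foldl_map (g := max)
    (f := fun i => prefA cs (i + K).toNat - prefA cs i.toNat)]
  by_cases hKn : K ≤ (n : Int)
  · -- full windows exist
    have hmin : min K (↑n : Int) = K := min_eq_left hKn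
    have hinit : ((cs.take K.toNat).count 'a' : Int) = prefA cs K.toNat := rfl
    have hA := A_fold cs K hK ((↑n - K).toNat) K le_rfl (by omega)
      ((cs.take K.toNat).count 'a' : Int)
    have hpair : (prefA cs K.toNat - prefA cs (K - K).toNat,
        ((cs.take K.toNat).count 'a' : Int)) = (((cs.take K.toNat).count 'a' : Int),
        ((cs.take K.toNat).count 'a' : Int)) := by
      have h00 : (K - K).toNat = 0 := by omega
      have h0 : prefA cs 0 = 0 := by simp [prefA]
      rw [h00, h0, sub_zero, ← hinit]
    rw [hpair] at hA
    rw [hA, hinit, hmin]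
    congr 1
    rw [PySem.List.pyRange_one K ↑n, PySem.List.pyRange_one 1 (↑n - K + 1),
      List.map_map, List.map_map]
    have he : (↑n - K + 1 - 1 : Int) = ↑n - K := by ring
    rw [he]
    apply List.map_congr_left
    intro k hk
    simp only [Function.comp_apply]
    have h1 : (K + ↑k + 1).toNat = ((1 + ↑k : Int) + K).toNat := by omega
    have h2 : (K + ↑k + 1 - K).toNat = ((1 + ↑k : Int)).toNat := by omega
    rw [h1, h2]
  · -- K > n : both loops are empty and both return the total count
    rw [PySem.List.pyRange_one_eq_nil (by omega), PySem.List.pyRange_one_eq_nil (by omega)]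
    simp only [List.foldl_nil, List.map_nil]
    have hmin : min K (↑n : Int) = (n : Int) := min_eq_right (by omega)
    rw [hmin]
    show ((cs.take K.toNat).count 'a' : Int) = prefA cs (↑n : Int).toNat
    have : prefA cs K.toNat = prefA cs n := prefA_of_le cs (by omega)
    rw [show ((↑n : Int)).toNat = n by omega, ← this]
    rfl

-- ===== VERDICT (by name: the statement is the Claim_ definition above) =====
theorem max_favourite_songs_spec : Claim_equal_max_favourite_songs := by
  intro S K _hDom hPre
  exact main_eq S K hPre
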